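-- pv_equiv track=rewrite | github.com/calabrialab/Code_AAV_integrations | step2 IS identification/adaptive.v2.py | getStartingMismatch
-- ===== SOURCE A (Python) =====
-- def getStartingMismatch(cigar_listf):
--     no_match = 0
--     for i in range(len(cigar_listf)):
--         bases, cigar_type = cigar_listf[i]
--         if cigar_type != 'M':
--             no_match += bases
--         else:
--             return (no_match, i)
-- ===== SOURCE B (Python) =====
-- def getStartingMismatch(cigar_listf):
--     i = next((idx for idx, (_, t) in enumerate(cigar_listf) if t == 'M'), None)
--     if i is None:
--         return None
--     return (sum(b for b, _ in cigar_listf[:i]), i)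
-- ===== Notes on version B (the rewrite author's own statement) =====
-- stated objective: simpler
-- what changed: Replaces the single loop threading an accumulator and early return with a locate pass (first index whose op is 'M') followed by a separate sum over the prefix before it.
import Mathlib
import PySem

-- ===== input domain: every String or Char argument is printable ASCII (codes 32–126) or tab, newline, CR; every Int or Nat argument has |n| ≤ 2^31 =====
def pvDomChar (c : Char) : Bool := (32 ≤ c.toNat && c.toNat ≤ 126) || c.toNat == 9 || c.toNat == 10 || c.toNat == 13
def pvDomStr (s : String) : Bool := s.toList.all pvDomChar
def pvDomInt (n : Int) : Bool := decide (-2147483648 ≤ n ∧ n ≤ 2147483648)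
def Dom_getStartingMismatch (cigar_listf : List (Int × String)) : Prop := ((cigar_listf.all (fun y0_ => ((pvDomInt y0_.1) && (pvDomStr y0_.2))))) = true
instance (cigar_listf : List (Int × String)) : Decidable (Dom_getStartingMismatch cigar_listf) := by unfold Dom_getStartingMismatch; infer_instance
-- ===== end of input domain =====

-- ===== PORT A =====
-- accumulating loop: add bases until the first 'M', returning (acc, index) there
def pvGoA (l : List (Int × String)) (acc : Int) (i : Int) : Option (Int × Int) :=
  match l with
  | [] => none
  | (bases, cigar_type) :: rest =>
      if cigar_type ≠ "M" then pvGoA rest (acc + bases) (i + 1)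
      else some (acc, i)

def getStartingMismatch (cigar_listf : List (Int × String)) : Option (Int × Int) :=
  pvGoA cigar_listf 0 0

-- ===== PORT B =====
-- B locates the first 'M' index, then sums the bases of the prefix before it
def getStartingMismatch_alt (cigar_listf : List (Int × String)) : Option (Int × Int) :=
  match cigar_listf.findIdx? (fun p => p.2 == "M") with
  | none => none
  | some i => some (((cigar_listf.take i).map Prod.fst).sum, (i : Int))

-- ===== PRECONDITION & SPEC =====
def Spec_getStartingMismatch (cigar_listf : List (Int × String)) (out : Option (Int × Int)) : Prop := out = getStartingMismatch_alt cigar_listf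
instance (cigar_listf : List (Int × String)) (out : Option (Int × Int)) : Decidable (Spec_getStartingMismatch cigar_listf out) := by unfold Spec_getStartingMismatch; infer_instance

-- ===== CLAIM (what is proved, stated in full; the proofs are below) =====
def Claim_equal_getStartingMismatch : Prop := ∀ (cigar_listf : List (Int × String)), Dom_getStartingMismatch cigar_listf → Spec_getStartingMismatch cigar_listf (getStartingMismatch cigar_listf)

-- ===== LEMMAS AND PROOFS =====
theorem pvGoA_eq (l : List (Int × String)) : ∀ (acc i : Int),
    pvGoA l acc i = match l.findIdx? (fun p => p.2 == "M") with
      | none => none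
      | some j => some (acc + ((l.take j).map Prod.fst).sum, i + (j : Int)) := by
  induction l with
  | nil => intro acc i; simp [pvGoA]
  | cons hd tl ih =>
    intro acc i
    obtain ⟨b, t⟩ := hd
    by_cases h : t = "M"
    · simp [pvGoA, List.findIdx?_cons, h]
    · simp only [pvGoA, List.findIdx?_cons, h, if_neg, ne_eq, not_false_iff, if_true,
        beq_iff_eq, if_false, ih]
      cases htl : tl.findIdx? (fun p => p.2 == "M") with
      | none => simp [h]
      | some j =>
        simp [h, htl, List.take_succ_cons]
        exact ⟨by ring, by ring⟩

-- ===== VERDICT (by name: the statement is the Claim_ definition above) =====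
theorem getStartingMismatch_spec : Claim_equal_getStartingMismatch := by
  intro l _
  unfold Spec_getStartingMismatch getStartingMismatch getStartingMismatch_alt
  rw [pvGoA_eq]
  cases h : l.findIdx? (fun p => p.2 == "M") <;> simp
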